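-- pv_equiv track=rewrite | github.com/shaclay346/My_Projects | wordle_ai/best_ai.py | moveRepeatedLetterWordsBack
-- ===== SOURCE A (Python) =====
-- def moveRepeatedLetterWordsBack(words):
--
--     wordsToNumRepeats = {}
--     # loop through words
--     for i in range(len(words)):
--         word = words[i]
--         # find number of unique letters
--         uniqueLets = set(word)
--         # map the string to its number of unique letters
--         wordsToNumRepeats[word] = len(uniqueLets)
--
--     # sort dictionary by value
--     s = sorted(wordsToNumRepeats.items(), key=lambda kv: kv[1])
--
--     # convert keys to list
--     sortedDict = dict(s)
--     words = list(sortedDict.keys())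
--
--     # reverse list so now words with most unique letter are in front
--     words.reverse()
--
--     return words
-- ===== SOURCE B (Python) =====
-- def moveRepeatedLetterWordsBack(words):
--     # counting sort on unique-letter counts instead of a comparison sort
--     seen = set()
--     items = []
--     maxc = -1
--     for w in words:
--         if w in seen:
--             continue
--         seen.add(w)
--         c = len(set(w))
--         items.append((w, c))
--         if c > maxc:
--             maxc = c
--     buckets = [[] for _ in range(maxc + 1)]
--     for w, c in items:
--         buckets[c].append(w)
--     out = []
--     for c in range(maxc, -1, -1):
--         out.extend(reversed(buckets[c]))
--     return out
-- ===== Notes on version B (the rewrite author's own statement) =====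
-- stated objective: alternative
-- what changed: Replaces dict-build + comparison sort + list.reverse with a single dedup pass that computes each distinct word's unique-letter count once (duplicates are skipped before the per-word set() work), a counting sort into buckets indexed by that count, and an output pass from the highest bucket down emitting each bucket reversed.
import Mathlib
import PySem

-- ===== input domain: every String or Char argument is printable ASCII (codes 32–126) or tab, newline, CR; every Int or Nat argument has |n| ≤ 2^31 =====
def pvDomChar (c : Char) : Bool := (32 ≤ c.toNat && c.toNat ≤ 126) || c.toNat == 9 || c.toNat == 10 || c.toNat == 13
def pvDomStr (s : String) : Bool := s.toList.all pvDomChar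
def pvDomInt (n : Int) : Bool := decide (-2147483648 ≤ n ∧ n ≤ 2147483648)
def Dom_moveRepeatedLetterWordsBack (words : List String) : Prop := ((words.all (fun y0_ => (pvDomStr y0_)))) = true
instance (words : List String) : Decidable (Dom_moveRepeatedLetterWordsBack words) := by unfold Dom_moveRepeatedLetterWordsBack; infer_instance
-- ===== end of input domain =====

-- B replaces A's dict + comparison sort + reverse by one dedup pass (counts computed
-- once per distinct word) and a counting sort over buckets indexed by that count.

-- ===== PORT A =====
def moveRepeatedLetterWordsBack (words : List String) : List String :=
  -- wordsToNumRepeats = {}; for i in range(len(words)): ...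
  let wordsToNumRepeats : PySem.Dict String Int :=
    (PySem.List.pyRange 0 (PySem.List.len words)).foldl
      (fun d i =>
        let word := PySem.List.pyGetD words i ""
        let uniqueLets := PySem.Set.ofList word.toList
        d.insert word (uniqueLets.length : Int))
      PySem.Dict.empty
  -- s = sorted(wordsToNumRepeats.items(), key=lambda kv: kv[1])
  let s := PySem.List.sorted wordsToNumRepeats.items (fun kv => kv.2) false
  -- sortedDict = dict(s); words = list(sortedDict.keys())
  let sortedDict := PySem.Dict.ofList s
  let words2 := sortedDict.keys
  -- words.reverse(); return words
  words2.reverse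

-- ===== PORT B =====
def moveRepeatedLetterWordsBack_alt (words : List String) : List String :=
  -- one dedup pass collecting (word, unique-letter count) and the maximal count
  let st :=
    words.foldl
      (fun (st : PySem.Set String × List (String × Int) × Int) w =>
        match st with
        | (seen, items, maxc) =>
          if PySem.Set.contains seen w then (seen, items, maxc)
          else
            let c : Int := ((PySem.Set.ofList w.toList).length : Int)
            (PySem.Set.add seen w, items ++ [(w, c)], if c > maxc then c else maxc))
      (PySem.Set.empty, [], -1)
  let items := st.2.1
  let maxc := st.2.2
  -- buckets = [[] for _ in range(maxc + 1)]; for w, c in items: buckets[c].append(w)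
  let buckets0 : List (List String) := List.replicate (maxc + 1).toNat []
  let buckets := items.foldl (fun bs p => bs.modify p.2.toNat (fun b => b ++ [p.1])) buckets0
  -- out = []; for c in range(maxc, -1, -1): out.extend(reversed(buckets[c]))
  (PySem.List.pyRange maxc (-1) (-1)).foldl
    (fun out c => out ++ (PySem.List.pyGetD buckets c []).reverse) []

-- ===== PRECONDITION & SPEC =====
def Spec_moveRepeatedLetterWordsBack (words : List String) (out : List String) : Prop := out = moveRepeatedLetterWordsBack_alt words
instance (words : List String) (out : List String) : Decidable (Spec_moveRepeatedLetterWordsBack words out) := by unfold Spec_moveRepeatedLetterWordsBack; infer_instance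

-- ===== CLAIM (what is proved, stated in full; the proofs are below) =====
def Claim_equal_moveRepeatedLetterWordsBack : Prop := ∀ (words : List String), Dom_moveRepeatedLetterWordsBack words → Spec_moveRepeatedLetterWordsBack words (moveRepeatedLetterWordsBack words)

-- ===== LEMMAS AND PROOFS =====

/-- number of unique letters of a word -/
def pvCnt (w : String) : Nat := (PySem.Set.ofList w.toList).length

/-- the deduplicated (word, count) pairs, in first-occurrence order -/
def pvItems (l : List String) : List (String × Int) :=
  (PySem.List.dedup l).map (fun w => (w, (pvCnt w : Int)))

/-- the maximum count as B computes it (-1 on the empty list) -/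
def pvMax (l : List String) : Int :=
  (PySem.List.dedup l).foldl
    (fun m w => if ((pvCnt w : Int)) > m then ((pvCnt w : Int)) else m) (-1)

-- insertBy walks past a prefix it does not insert into
theorem pv_insertBy_append_left {α : Type} (b : α → α → Bool) (x : α) (ys zs : List α)
    (h : ∀ y ∈ ys, b x y = false) :
    PySem.List.insertBy b x (ys ++ zs) = ys ++ PySem.List.insertBy b x zs := by
  induction ys with
  | nil => simp
  | cons y ys ih =>
      have hy : b x y = false := h y (by simp)
      simp [PySem.List.insertBy, hy]
      exact ih (fun y hy => h y (by simp [hy]))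

-- insertBy puts x in front when everything compares greater
theorem pv_insertBy_all {α : Type} (b : α → α → Bool) (x : α) (zs : List α)
    (h : ∀ y ∈ zs, b x y = true) :
    PySem.List.insertBy b x zs = x :: zs := by
  cases zs with
  | nil => simp [PySem.List.insertBy]
  | cons z zs => simp [PySem.List.insertBy, h z (by simp)]

theorem pv_flatMap_congr_mem {α β : Type} (l : List α) (f g : α → List β)
    (h : ∀ a ∈ l, f a = g a) : l.flatMap f = l.flatMap g := by
  induction l with
  | nil => simp
  | cons a l ih =>
      simp only [List.flatMap_cons, h a (by simp)]
      rw [ih (fun a ha => h a (by simp [ha]))]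

-- the stable ascending sort by an Int key ranging in [0, N) is the bucket concatenation
theorem pv_sorted_eq_flatMap (l : List (String × Int)) (N : Nat) :
    (∀ p ∈ l, ∃ c : Nat, c < N ∧ p.2 = (c : Int)) →
    PySem.List.sorted l (fun p => p.2) false
      = (List.range N).flatMap (fun (c : Nat) => l.filter (fun p => p.2 == (c : Int))) := by
  induction l using List.reverseRecOn with
  | nil => intro _; simp [PySem.List.sorted]
  | append_singleton l x ih =>
      intro h
      obtain ⟨k, hkN, hx2⟩ := h x (by simp)
      have ih' := ih (fun p hp => h p (by simp [hp]))
      rw [PySem.List.sorted_eq_foldl_insertBy, List.foldl_append]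
      simp only [List.foldl_cons, List.foldl_nil]
      rw [← PySem.List.sorted_eq_foldl_insertBy, ih']
      have hsplit : List.range N
          = List.range (k+1) ++ (List.range (N-(k+1))).map (fun j => (k+1)+j) := by
        rw [← List.range_add]; congr 1; omega
      rw [hsplit, List.flatMap_append, List.flatMap_append]
      rw [pv_insertBy_append_left _ _ _ _ ?hpre]
      rw [pv_insertBy_all _ _ _ ?hall]
      case hpre =>
        intro y hy
        obtain ⟨c, hc, hyf⟩ := List.mem_flatMap.mp hy
        have hc' : c < k+1 := List.mem_range.mp hc
        have hy2 : y.2 = (c : Int) := by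
          have := List.of_mem_filter hyf
          simpa [beq_iff_eq] using this
        simp only [hx2, hy2, decide_eq_false_iff_not]
        omega
      case hall =>
        intro y hy
        obtain ⟨c, hc, hyf⟩ := List.mem_flatMap.mp hy
        obtain ⟨j, hj, rfl⟩ := List.mem_map.mp hc
        have hy2 : y.2 = ((k+1+j : Nat) : Int) := by
          have := List.of_mem_filter hyf
          simpa [beq_iff_eq] using this
        simp only [hx2, hy2, decide_eq_true_eq]
        omega
      have hB2 : ((List.range (N-(k+1))).map (fun j => (k+1)+j)).flatMap
            (fun (c : Nat) => (l++[x]).filter (fun p => p.2 == (c : Int)))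
          = ((List.range (N-(k+1))).map (fun j => (k+1)+j)).flatMap
            (fun (c : Nat) => l.filter (fun p => p.2 == (c : Int))) := by
        apply pv_flatMap_congr_mem
        intro c hc
        obtain ⟨j, hj, rfl⟩ := List.mem_map.mp hc
        rw [List.filter_append]
        have hxf : ¬ (x.2 = (k : Int) + 1 + (j : Int)) := by
          rw [hx2]; omega
        simp [List.filter_cons, hxf]
      have hB1 : (List.range (k+1)).flatMap
            (fun (c : Nat) => (l++[x]).filter (fun p => p.2 == (c : Int)))
          = (List.range (k+1)).flatMap (fun (c : Nat) => l.filter (fun p => p.2 == (c : Int))) ++ [x] := by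
        rw [List.range_succ, List.flatMap_append, List.flatMap_append]
        have hcong : (List.range k).flatMap (fun (c : Nat) => (l++[x]).filter (fun p => p.2 == (c : Int)))
            = (List.range k).flatMap (fun (c : Nat) => l.filter (fun p => p.2 == (c : Int))) := by
          apply pv_flatMap_congr_mem
          intro c hc
          have hck : c < k := List.mem_range.mp hc
          rw [List.filter_append]
          have hxf : ¬ (x.2 = ((c : Nat) : Int)) := by
            rw [hx2]; push_cast; omega
          simp [List.filter_cons, hxf]
        rw [hcong]
        have hxk : List.filter (fun (p : String × Int) => p.2 == ((k : Nat) : Int)) [x] = [x] := by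
          simp [hx2]
        simp [List.filter_append, List.filter_cons, hxk, List.append_assoc, hx2]
      rw [hB1, hB2]
      simp [List.append_assoc]

-- A's first loop builds exactly the deduplicated items
theorem pv_itemsA (l : List String) :
    (l.foldl (fun d w => d.insert w (((PySem.Set.ofList w.toList).length : Int)))
        PySem.Dict.empty).items
      = pvItems l := by
  induction l using List.reverseRecOn with
  | nil => rfl
  | append_singleton l w ih =>
      rw [List.foldl_append]
      simp only [List.foldl_cons, List.foldl_nil]
      by_cases hw : w ∈ l
      · have hck : (l.foldl (fun d w => d.insert w (((PySem.Set.ofList w.toList).length : Int)))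
            PySem.Dict.empty).contains w = true := by
          rw [PySem.Dict.contains_eq_decide_mem_keys]
          simp only [PySem.Dict.keys, ih, pvItems, List.map_map]
          simp [Function.comp, PySem.List.mem_dedup, hw]
        rw [PySem.Dict.items_insert_of_contains _ _ hck, ih]
        have hd : PySem.List.dedup (l ++ [w]) = PySem.List.dedup l := by
          simp only [PySem.List.dedup_eq_ofList, PySem.Set.ofList_append_singleton]
          exact PySem.Set.add_of_mem ((PySem.Set.mem_ofList _ _).mpr hw)
        simp only [pvItems, hd, List.map_map]
        apply List.map_congr_left
        intro u hu
        by_cases huw : u = w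
        · subst huw; simp [pvCnt]
        · simp [Function.comp, huw]
      · have hck : (l.foldl (fun d w => d.insert w (((PySem.Set.ofList w.toList).length : Int)))
            PySem.Dict.empty).contains w = false := by
          rw [PySem.Dict.contains_eq_decide_mem_keys]
          simp only [PySem.Dict.keys, ih, pvItems, List.map_map]
          simp [Function.comp, PySem.List.mem_dedup, hw]
        rw [PySem.Dict.items_insert_of_not_contains _ _ hck, ih]
        have hs : PySem.Set.ofList (l ++ [w]) = PySem.Set.ofList l ++ [w] := by
          rw [PySem.Set.ofList_append_singleton]
          exact PySem.Set.add_of_not_mem (fun hmem => hw ((PySem.Set.mem_ofList _ _).mp hmem))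
        simp [pvItems, pvCnt, hs]

-- dict(s) has items s when s's keys are distinct
theorem pv_items_ofList (s : List (String × Int)) (h : (s.map Prod.fst).Nodup) :
    (PySem.Dict.ofList s).items = s := by
  unfold PySem.Dict.ofList PySem.Dict.update
  rw [PySem.Dict.items_foldl_insert_fresh s Prod.fst Prod.snd PySem.Dict.empty
        (fun a _ => PySem.Dict.contains_empty a.1) h]
  have he : (PySem.Dict.empty : PySem.Dict String Int).items = [] := rfl
  rw [he]
  simp

-- B's first loop: final state
theorem pv_loop1 (l : List String) :
    l.foldl
      (fun (st : PySem.Set String × List (String × Int) × Int) w =>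
        match st with
        | (seen, items, maxc) =>
          if PySem.Set.contains seen w then (seen, items, maxc)
          else
            let c : Int := ((PySem.Set.ofList w.toList).length : Int)
            (PySem.Set.add seen w, items ++ [(w, c)], if c > maxc then c else maxc))
      (PySem.Set.empty, [], -1)
    = (PySem.Set.ofList l, pvItems l, pvMax l) := by
  induction l using List.reverseRecOn with
  | nil => rfl
  | append_singleton l w ih =>
      rw [List.foldl_append, ih]
      simp only [List.foldl_cons, List.foldl_nil]
      by_cases hw : w ∈ l
      · have hc : PySem.Set.contains (PySem.Set.ofList l) w = true :=
          (PySem.Set.contains_iff _ _).mpr ((PySem.Set.mem_ofList _ _).mpr hw)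
        have hs : PySem.Set.ofList (l ++ [w]) = PySem.Set.ofList l := by
          rw [PySem.Set.ofList_append_singleton]
          exact PySem.Set.add_of_mem ((PySem.Set.mem_ofList _ _).mpr hw)
        have hd : PySem.List.dedup (l ++ [w]) = PySem.List.dedup l := by
          simpa [PySem.List.dedup_eq_ofList] using hs
        simp [hc, hs, pvItems, pvMax, hd, hw]
      · have hc : PySem.Set.contains (PySem.Set.ofList l) w = false :=
          Bool.eq_false_iff.mpr
            (fun h => hw ((PySem.Set.mem_ofList _ _).mp ((PySem.Set.contains_iff _ _).mp h)))
        have hs : PySem.Set.ofList (l ++ [w]) = PySem.Set.ofList l ++ [w] := by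
          rw [PySem.Set.ofList_append_singleton]
          exact PySem.Set.add_of_not_mem (fun hmem => hw ((PySem.Set.mem_ofList _ _).mp hmem))
        have hd : PySem.List.dedup (l ++ [w]) = PySem.List.dedup l ++ [w] := by
          simpa [PySem.List.dedup_eq_ofList] using hs
        simp [hw, hs, hd, pvItems, pvCnt, pvMax, List.foldl_append,
              PySem.Set.add_of_not_mem]

theorem pv_foldl_max_le_init (l : List String) (m : Int) :
    m ≤ l.foldl (fun m w => if ((pvCnt w : Int)) > m then ((pvCnt w : Int)) else m) m := by
  induction l generalizing m with
  | nil => simp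
  | cons w l ih =>
      simp only [List.foldl_cons]
      refine le_trans ?_ (ih _)
      split <;> omega

theorem pv_foldl_max_mem (l : List String) (m : Int) {w : String} (hw : w ∈ l) :
    (pvCnt w : Int) ≤ l.foldl (fun m w => if ((pvCnt w : Int)) > m then ((pvCnt w : Int)) else m) m := by
  induction l generalizing m with
  | nil => cases hw
  | cons u l ih =>
      simp only [List.foldl_cons]
      rcases List.mem_cons.mp hw with h | h
      · subst h
        refine le_trans ?_ (pv_foldl_max_le_init l _)
        split <;> omega
      · exact ih _ h

theorem pv_neg_one_le_pvMax (l : List String) : -1 ≤ pvMax l :=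
  pv_foldl_max_le_init _ _

theorem pv_le_pvMax (l : List String) {w : String} (hw : w ∈ PySem.List.dedup l) :
    (pvCnt w : Int) ≤ pvMax l :=
  pv_foldl_max_mem _ _ hw

-- the bucket loop produces the filter table
theorem pv_buckets (ws : List String) (N : Nat) :
    (∀ w ∈ ws, pvCnt w < N) →
    ((ws.map (fun w => (w, (pvCnt w : Int)))).foldl
        (fun bs p => bs.modify p.2.toNat (fun b => b ++ [p.1]))
        (List.replicate N ([] : List String)))
      = (List.range N).map (fun c => ws.filter (fun w => pvCnt w == c)) := by
  induction ws using List.reverseRecOn with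
  | nil =>
      intro _
      simp [List.map_const']
  | append_singleton ws w ih =>
      intro h
      rw [List.map_append, List.foldl_append, ih (fun u hu => h u (List.mem_append_left _ hu))]
      simp only [List.map_cons, List.map_nil, List.foldl_cons, List.foldl_nil]
      have hw : pvCnt w < N := h w (by simp)
      apply List.ext_getElem
      · simp
      · intro j hj1 hj2
        have hjN : j < N := by simpa using hj2
        rw [List.getElem_modify]
        simp only [Int.toNat_natCast, List.getElem_map, List.getElem_range]
        by_cases hkj : pvCnt w = j
        · simp [hkj, List.filter_append, List.filter_cons]
        · simp [hkj, List.filter_append, List.filter_cons]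

-- reversed traversal with reversed chunks is the reverse of the forward concatenation
theorem pv_rev_out (cs : List Nat) (F : Nat → List String) :
    cs.reverse.foldl (fun out c => out ++ (F c).reverse) [] = (cs.flatMap F).reverse := by
  rw [PySem.List.foldl_append_eq_flatMap, List.reverse_flatMap]
  simp only [List.nil_append]
  rfl

-- characterization of A's output
theorem pv_A_char (words : List String) :
    moveRepeatedLetterWordsBack words
      = ((PySem.List.sorted (pvItems words) (fun kv => kv.2) false).map Prod.fst).reverse := by
  have hnd : ((PySem.List.sorted (pvItems words) (fun kv => kv.2) false).map Prod.fst).Nodup := by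
    have hperm := (PySem.List.sorted_perm (pvItems words) (fun kv => kv.2) false).map Prod.fst
    rw [hperm.nodup_iff]
    simp only [pvItems, List.map_map]
    have hcomp : (Prod.fst ∘ fun w => ((w, (pvCnt w : Int)) : String × Int)) = fun w => w := by
      funext u; rfl
    rw [hcomp]
    simpa using PySem.List.nodup_dedup words
  simp only [moveRepeatedLetterWordsBack, PySem.List.len_eq]
  rw [PySem.List.foldl_pyRange_zero_pyGetD' words ""
        (fun (d : PySem.Dict String Int) word =>
          d.insert word ((PySem.Set.ofList word.toList).length : Int))
        PySem.Dict.empty]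
  rw [pv_itemsA]
  simp only [PySem.Dict.keys]
  rw [pv_items_ofList _ hnd]

-- characterization of B's output
theorem pv_B_char (words : List String) :
    moveRepeatedLetterWordsBack_alt words
      = ((List.range (pvMax words + 1).toNat).flatMap
          (fun c => (PySem.List.dedup words).filter (fun w => pvCnt w == c))).reverse := by
  have hbound : ∀ w ∈ PySem.List.dedup words, pvCnt w < (pvMax words + 1).toNat := by
    intro w hw
    have h1 := pv_le_pvMax words hw
    have h2 := pv_neg_one_le_pvMax words
    omega
  simp only [moveRepeatedLetterWordsBack_alt, pv_loop1]
  simp only [pvItems]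
  rw [pv_buckets _ _ hbound]
  rw [PySem.List.pyRange_neg_one_eq_reverse]
  rw [show ((-1 : Int) + 1) = 0 by norm_num]
  rw [PySem.List.pyRange_one]
  simp only [sub_zero, zero_add]
  rw [← List.map_reverse, List.foldl_map]
  rw [PySem.List.foldl_congr_mem _ _
        (fun (out : List String) (k : Nat) =>
          out ++ ((PySem.List.dedup words).filter (fun w => pvCnt w == k)).reverse) _ ?hfn]
  case hfn =>
    intro acc k hk
    have hkN : k < (pvMax words + 1).toNat := by
      rw [List.mem_reverse, List.mem_range] at hk; exact hk
    rw [PySem.List.pyGetD_natCast]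
    rw [List.getD_eq_getElem?_getD]
    simp [List.getElem?_map, List.getElem?_range hkN]
  rw [pv_rev_out]

-- ===== VERDICT (by name: the statement is the Claim_ definition above) =====
theorem moveRepeatedLetterWordsBack_spec : Claim_equal_moveRepeatedLetterWordsBack := by
  intro words _
  unfold Spec_moveRepeatedLetterWordsBack
  rw [pv_A_char, pv_B_char]
  have hbound : ∀ w ∈ PySem.List.dedup words, pvCnt w < (pvMax words + 1).toNat := by
    intro w hw
    have h1 := pv_le_pvMax words hw
    have h2 := pv_neg_one_le_pvMax words
    omega
  rw [pv_sorted_eq_flatMap (pvItems words) ((pvMax words + 1).toNat) ?hitems]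
  case hitems =>
    intro p hp
    simp only [pvItems, List.mem_map] at hp
    obtain ⟨w, hw, rfl⟩ := hp
    exact ⟨pvCnt w, hbound w hw, rfl⟩
  rw [List.map_flatMap]
  congr 1
  apply pv_flatMap_congr_mem
  intro c hc
  simp only [pvItems, List.filter_map, List.map_map]
  have hpred : ((fun (p : String × Int) => p.2 == (c : Int)) ∘
        (fun w => ((w, (pvCnt w : Int)) : String × Int))) = (fun w => pvCnt w == c) := by
    funext u
    simp [Function.comp, beq_eq_decide]
  rw [hpred]
  have hcomp : (Prod.fst ∘ fun w => ((w, (pvCnt w : Int)) : String × Int)) = fun w => w := by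
    funext u; rfl
  rw [hcomp]
  simp
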